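-- pv_equiv track=rewrite | github.com/naplr/momxls | code/momxlssite/momformatter/formatter/helper.py | create_writable_list
-- ===== SOURCE A (Python) =====
-- def create_writable_list(num_columns, num_columns_in_between, num_rows_in_between, li):
--     lines = []
--     # Iterate through items
--     for start_index in range(0, len(li), num_columns):
--         # Get list of items that should be on the same line (according to #colums)
--         current_set = li[start_index:start_index + num_columns]
--         max_lines = max([len(item[0]) for item in current_set])
--         for i in range(max_lines):
--             line = []
--             for s in current_set:
--                 name_address = s[0]
--                 # Add description on the first line.
--                 line.append((name_address[i] if len(name_address) > i else ''))
--                 line.append(s[1] if i == 0 else '')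
--                 line.append('')
--             lines.append(line)
--         for i in range(num_rows_in_between):
--             lines.append([])
--
--     return lines
-- ===== SOURCE B (Python) =====
-- def create_writable_list(num_columns, num_columns_in_between, num_rows_in_between, li):
--     lines = []
--     for start in range(0, len(li), num_columns):
--         group = li[start:start + num_columns]
--         max_lines = max(len(s[0]) for s in group)
--         # Build one column (a list of (name, desc, blank) triples) per item,
--         # then transpose column-major data into rows and flatten each row.
--         columns = [[(s[0][i] if i < len(s[0]) else '',
--                      s[1] if i == 0 else '',
--                      '') for i in range(max_lines)] for s in group]
--         for row in zip(*columns):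
--             lines.append([cell for triple in row for cell in triple])
--         lines += [[] for _ in range(num_rows_in_between)]
--     return lines
-- ===== Notes on version B (the rewrite author's own statement) =====
-- stated objective: alternative
-- what changed: B builds each group column-major as per-item lists of (name, description, blank) triples, transposes them with zip(*columns) and flattens each transposed row, instead of A's row-major nested line/item loop with three appends per item; trailing empty rows are added with a list comprehension instead of an append loop.
-- outside the precondition, e.g. on create_writable_list(0, 0, 0, []): A raises ValueError, B raises ValueError
import Mathlib
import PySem

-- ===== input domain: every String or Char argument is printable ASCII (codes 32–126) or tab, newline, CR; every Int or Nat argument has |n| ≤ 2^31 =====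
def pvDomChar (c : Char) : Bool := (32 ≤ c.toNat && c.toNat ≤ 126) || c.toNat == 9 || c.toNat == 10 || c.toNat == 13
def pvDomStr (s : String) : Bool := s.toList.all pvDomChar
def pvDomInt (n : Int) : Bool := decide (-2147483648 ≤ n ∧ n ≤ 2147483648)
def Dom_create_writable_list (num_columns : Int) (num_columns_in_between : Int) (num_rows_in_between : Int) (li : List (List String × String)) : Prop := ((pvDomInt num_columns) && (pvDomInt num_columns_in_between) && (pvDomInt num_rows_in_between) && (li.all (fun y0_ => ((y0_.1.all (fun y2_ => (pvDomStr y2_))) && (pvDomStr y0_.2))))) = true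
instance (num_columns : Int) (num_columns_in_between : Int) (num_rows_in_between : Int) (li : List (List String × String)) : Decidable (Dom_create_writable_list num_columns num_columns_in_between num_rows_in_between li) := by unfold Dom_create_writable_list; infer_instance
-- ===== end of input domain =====

-- B builds each group column-major (one list of (name, desc, blank) triples per item),
-- transposes with zip(*columns) and flattens each transposed row — a different decomposition
-- of the same layout ('alternative' objective, no speed claim).

-- ===== PORT A =====
def create_writable_list (num_columns : Int) (num_columns_in_between : Int) (num_rows_in_between : Int) (li : List (List String × String)) : List (List String) :=
  (PySem.List.pyRange 0 (li.length : Int) num_columns).foldl (fun lines start_index =>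
    let current_set := PySem.List.slice li (some start_index) (some (start_index + num_columns))
    -- max([...]) : current_set is nonempty whenever this body runs, so the .getD 0 branch is unreachable
    let max_lines : Int := (PySem.List.max? (current_set.map (fun item => (item.1.length : Int))) (fun x => x)).getD 0
    let lines := (PySem.List.pyRange 0 max_lines 1).foldl (fun lines i =>
      let line : List String := current_set.foldl (fun line s =>
        let name_address := s.1
        ((line ++ [if (name_address.length : Int) > i then (PySem.List.pyGet? name_address i).getD "" else ""]) ++
          [if i == 0 then s.2 else ""]) ++ [""]) []
      lines ++ [line]) lines
    (PySem.List.pyRange 0 num_rows_in_between 1).foldl (fun lines _ => lines ++ [([] : List String)]) lines) []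

-- ===== PORT B =====
-- B-side helper: sum of the column lengths, the termination measure of pyZipStar
def pvLenSum {α : Type} (cols : List (List α)) : Nat := (cols.map List.length).sum

theorem pvLenSum_tail_le {α : Type} (cols : List (List α)) :
    pvLenSum (cols.map List.tail) ≤ pvLenSum cols := by
  induction cols with
  | nil => simp [pvLenSum]
  | cons a t ih =>
      simp only [pvLenSum, List.map_cons, List.sum_cons] at *
      have : a.tail.length ≤ a.length := by cases a <;> simp
      omega

theorem pvLenSum_lt {α : Type} (cols : List (List α)) (h1 : cols ≠ [])
    (h2 : cols.all (fun c => !c.isEmpty) = true) :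
    pvLenSum (cols.map List.tail) < pvLenSum cols := by
  cases cols with
  | nil => exact absurd rfl h1
  | cons a t =>
      simp only [List.all_cons, Bool.and_eq_true] at h2
      have ha : a ≠ [] := by cases a <;> simp_all
      have hle := pvLenSum_tail_le t
      have hlt : a.tail.length < a.length := by
        cases a with
        | nil => exact absurd rfl ha
        | cons x xs => simp
      simp only [pvLenSum, List.map_cons, List.sum_cons] at *
      omega

-- zip(*cols): repeatedly take all heads while every column is nonempty
def pyZipStar {α : Type} (cols : List (List α)) : List (List α) :=
  if h : cols ≠ [] ∧ cols.all (fun c => !c.isEmpty) = true then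
    cols.filterMap List.head? :: pyZipStar (cols.map List.tail)
  else []
termination_by pvLenSum cols
decreasing_by exact pvLenSum_lt cols h.1 h.2

def create_writable_list_alt (num_columns : Int) (num_columns_in_between : Int) (num_rows_in_between : Int) (li : List (List String × String)) : List (List String) :=
  (PySem.List.pyRange 0 (li.length : Int) num_columns).foldl (fun lines start =>
    let group := PySem.List.slice li (some start) (some (start + num_columns))
    let max_lines : Int := (PySem.List.max? (group.map (fun s => (s.1.length : Int))) (fun x => x)).getD 0
    let columns := group.map (fun s =>
      (PySem.List.pyRange 0 max_lines 1).map (fun i =>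
        (if i < (s.1.length : Int) then (PySem.List.pyGet? s.1 i).getD "" else "",
         if i == 0 then s.2 else "", ("" : String))))
    let lines := (pyZipStar columns).foldl (fun lines row =>
      lines ++ [row.flatMap (fun t => [t.1, t.2.1, t.2.2])]) lines
    lines ++ (PySem.List.pyRange 0 num_rows_in_between 1).map (fun _ => ([] : List String))) []

-- ===== PRECONDITION & SPEC =====
-- Pre_ excludes exactly num_columns = 0, where Python's range(0, len(li), 0) raises ValueError.
def Pre_create_writable_list (num_columns : Int) (num_columns_in_between : Int) (num_rows_in_between : Int) (li : List (List String × String)) : Prop := num_columns ≠ 0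
instance (num_columns : Int) (num_columns_in_between : Int) (num_rows_in_between : Int) (li : List (List String × String)) : Decidable (Pre_create_writable_list num_columns num_columns_in_between num_rows_in_between li) := by unfold Pre_create_writable_list; infer_instance

def pvWitness_create_writable_list : Int × Int × Int × (List (List String × String)) := (2, 1, 1, [(["Ann", "1 Main St"], "desc"), (["Bob"], "d2"), (["Cy", "x", "y"], "d3")])

def Spec_create_writable_list (num_columns : Int) (num_columns_in_between : Int) (num_rows_in_between : Int) (li : List (List String × String)) (out : List (List String)) : Prop := out = create_writable_list_alt num_columns num_columns_in_between num_rows_in_between li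
instance (num_columns : Int) (num_columns_in_between : Int) (num_rows_in_between : Int) (li : List (List String × String)) (out : List (List String)) : Decidable (Spec_create_writable_list num_columns num_columns_in_between num_rows_in_between li out) := by unfold Spec_create_writable_list; infer_instance

-- ===== CLAIM (what is proved, stated in full; the proofs are below) =====
def Claim_equal_create_writable_list : Prop := ∀ (num_columns : Int) (num_columns_in_between : Int) (num_rows_in_between : Int) (li : List (List String × String)), Dom_create_writable_list num_columns num_columns_in_between num_rows_in_between li → Pre_create_writable_list num_columns num_columns_in_between num_rows_in_between li → Spec_create_writable_list num_columns num_columns_in_between num_rows_in_between li (create_writable_list num_columns num_columns_in_between num_rows_in_between li)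

-- ===== LEMMAS AND PROOFS =====

-- transposing a rectangular column-major matrix: pyZipStar over per-item columns of length n
theorem pv_zip_transpose {α β : Type} (n : Nat) (g : List β) (t : β → Nat → α)
    (hg : g = [] → n = 0) :
    pyZipStar (g.map (fun s => (List.range n).map (t s))) =
      (List.range n).map (fun k => g.map (fun s => t s k)) := by
  induction n generalizing t with
  | zero =>
      cases g <;> simp [pyZipStar]
  | succ n ih =>
      have hg' : g ≠ [] := fun h => Nat.succ_ne_zero n (hg h)
      rw [List.range_succ_eq_map]
      simp only [List.map_cons, List.map_map]
      rw [pyZipStar]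
      rw [dif_pos]
      · congr 1
        · simp [List.filterMap_map, Function.comp]
        · rw [List.map_map]
          exact ih (fun s k => t s (k + 1)) (fun h => absurd h hg')
      · constructor
        · simpa using hg'
        · simp [List.all_eq_true]

-- the inner 'for s in current_set' loop builds the flattened triple row
theorem pv_line_eq {β : Type} (g : List β) (f1 f2 f3 : β → String) (acc : List String) :
    g.foldl (fun line s => ((line ++ [f1 s]) ++ [f2 s]) ++ [f3 s]) acc =
      acc ++ g.flatMap (fun s => [f1 s, f2 s, f3 s]) := by
  induction g generalizing acc with
  | nil => simp
  | cons a t ih => simp [List.flatMap_def]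

-- per-group rows: A's line-major nested loop equals B's column-major build + transpose
theorem pv_rows_eq {β : Type} (g : List β) (m : Int) (hg : g = [] → m = 0)
    (f1 f2 f3 : β → Int → String) :
    (PySem.List.pyRange 0 m 1).map (fun i =>
        g.foldl (fun line s => ((line ++ [f1 s i]) ++ [f2 s i]) ++ [f3 s i]) []) =
      (pyZipStar (g.map (fun s =>
          (PySem.List.pyRange 0 m 1).map (fun i => (f1 s i, f2 s i, f3 s i))))).map
        (fun row => row.flatMap (fun t => [t.1, t.2.1, t.2.2])) := by
  rw [PySem.List.pyRange_one]
  simp only [List.map_map, Function.comp_def]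
  rw [pv_zip_transpose ((m - 0).toNat) g
      (fun s k => (f1 s (0 + (k : Int)), f2 s (0 + (k : Int)), f3 s (0 + (k : Int))))
      (fun h => by simp [hg h])]
  simp only [List.map_map, Function.comp_def]
  refine List.map_congr_left (fun k _ => ?_)
  rw [pv_line_eq]
  simp [List.flatMap_map]

-- one group's contribution: A's nested line/item loops equal B's column build + transpose + flatten
theorem pv_body_eq (nrib : Int) (g : List (List String × String)) (lines : List (List String)) :
    (PySem.List.pyRange 0 nrib 1).foldl (fun l _ => l ++ [([] : List String)])
      ((PySem.List.pyRange 0 ((PySem.List.max? (g.map (fun item => (item.1.length : Int))) (fun x => x)).getD 0) 1).foldl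
        (fun ls i =>
          ls ++ [g.foldl (fun line s =>
            ((line ++ [if (s.1.length : Int) > i then (PySem.List.pyGet? s.1 i).getD "" else ""]) ++
              [if i == 0 then s.2 else ""]) ++ [""]) []]) lines)
    = ((pyZipStar (g.map (fun s =>
          (PySem.List.pyRange 0 ((PySem.List.max? (g.map (fun s => (s.1.length : Int))) (fun x => x)).getD 0) 1).map
            (fun i => (if i < (s.1.length : Int) then (PySem.List.pyGet? s.1 i).getD "" else "",
                       if i == 0 then s.2 else "", ("" : String)))))).foldl
        (fun ls row => ls ++ [row.flatMap (fun t => [t.1, t.2.1, t.2.2])]) lines)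
      ++ (PySem.List.pyRange 0 nrib 1).map (fun _ => ([] : List String)) := by
  have hg : g = [] → ((PySem.List.max? (g.map (fun item => (item.1.length : Int))) (fun x => x)).getD 0) = 0 := by
    intro h; subst h; rfl
  rw [PySem.List.foldl_append_singleton_eq_map (f := fun _ => ([] : List String))]
  rw [PySem.List.foldl_append_singleton_eq_map]
  rw [PySem.List.foldl_append_singleton_eq_map]
  rw [List.append_assoc, List.append_assoc]
  congr 1
  congr 1
  simp only [gt_iff_lt]
  exact pv_rows_eq g _ hg
    (fun s i => if i < (s.1.length : Int) then (PySem.List.pyGet? s.1 i).getD "" else "")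
    (fun s i => if i == 0 then s.2 else "") (fun s i => "")

-- ===== VERDICT (by name: the statement is the Claim_ definition above) =====
theorem create_writable_list_spec : Claim_equal_create_writable_list := by
  intro num_columns num_columns_in_between num_rows_in_between li _ _
  unfold Spec_create_writable_list create_writable_list create_writable_list_alt
  refine PySem.List.foldl_congr_mem _ _ _ _ ?_
  intro lines start _
  exact pv_body_eq num_rows_in_between
    (PySem.List.slice li (some start) (some (start + num_columns))) lines
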